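-- pv_equiv track=rewrite | github.com/michealglory/alx-higher_level_programming | 0x04-python-more_data_structures/102-complex_delete.py | complex_delete
-- ===== SOURCE A (Python) =====
-- def complex_delete(a_dictionary, value):
--     keys_to_deleted = []
--     for key in a_dictionary:
--         if a_dictionary[key] == value:
--             keys_to_deleted.append(key)
--     for key in keys_to_deleted:
--         del a_dictionary[key]
--     return a_dictionary
-- ===== SOURCE B (Python) =====
-- def complex_delete(a_dictionary, value):
--     kept = {k: v for k, v in a_dictionary.items() if v != value}
--     a_dictionary.clear()
--     a_dictionary.update(kept)
--     return a_dictionary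
-- ===== Notes on version B (the rewrite author's own statement) =====
-- stated objective: idiomatic
-- what changed: B builds the complement dict in one comprehension pass and reinstalls it via clear()+update(), instead of A's two-pass collect-keys-then-del loop.
import Mathlib
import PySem

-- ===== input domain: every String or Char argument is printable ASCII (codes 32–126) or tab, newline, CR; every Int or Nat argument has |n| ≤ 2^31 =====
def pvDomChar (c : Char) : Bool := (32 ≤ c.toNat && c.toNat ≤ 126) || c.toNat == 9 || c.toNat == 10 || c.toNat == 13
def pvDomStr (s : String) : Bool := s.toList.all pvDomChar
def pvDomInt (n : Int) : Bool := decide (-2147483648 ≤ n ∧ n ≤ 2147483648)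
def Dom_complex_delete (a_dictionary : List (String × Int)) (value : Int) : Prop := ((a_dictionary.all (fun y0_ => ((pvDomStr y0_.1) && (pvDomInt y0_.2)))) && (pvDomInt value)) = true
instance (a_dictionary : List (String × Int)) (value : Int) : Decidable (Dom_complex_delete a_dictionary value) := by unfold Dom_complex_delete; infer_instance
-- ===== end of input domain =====

-- B replaces A's collect-keys-then-delete loops by one complement-building pass
-- (dict comprehension + clear/update); same O(n) cost, shorter and more idiomatic.
-- Both A and B mutate a_dictionary in place AND return it; the equivalence proved
-- here is about the returned value (which is also the final in-place state).

-- ===== PORT A =====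
-- a_dictionary[key]: first-match lookup in the association list
def pvLookup (d : List (String × Int)) (k : String) : Option Int :=
  match d with
  | [] => none
  | p :: t => if p.1 = k then some p.2 else pvLookup t k

-- first loop: for key in a_dictionary: if a_dictionary[key] == value: append key
def pvCollect (full : List (String × Int)) (d : List (String × Int)) (value : Int) : List String :=
  match d with
  | [] => []
  | p :: t =>
      if pvLookup full p.1 = some value then p.1 :: pvCollect full t value
      else pvCollect full t value

-- del a_dictionary[key]: remove the (first) binding of key
def pvDel (d : List (String × Int)) (k : String) : List (String × Int) :=
  match d with
  | [] => []
  | p :: t => if p.1 = k then t else p :: pvDel t k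

def complex_delete (a_dictionary : List (String × Int)) (value : Int) : List (String × Int) :=
  let keys_to_deleted := pvCollect a_dictionary a_dictionary value
  keys_to_deleted.foldl pvDel a_dictionary

-- ===== PORT B =====
-- kept = {k: v for k, v in a_dictionary.items() if v != value}; clear(); update(kept)
def complex_delete_alt (a_dictionary : List (String × Int)) (value : Int) : List (String × Int) :=
  a_dictionary.filter (fun p => p.2 != value)

-- ===== PRECONDITION & SPEC =====
-- Pre_ excludes association lists with duplicate keys: those do not represent any
-- Python dict (both A and B receive a dict and raise on any other input).
def Pre_complex_delete (a_dictionary : List (String × Int)) (_value : Int) : Prop :=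
  (a_dictionary.map Prod.fst).Nodup

instance (a_dictionary : List (String × Int)) (value : Int) : Decidable (Pre_complex_delete a_dictionary value) := by unfold Pre_complex_delete; infer_instance

def pvWitness_complex_delete : (List (String × Int)) × Int := ([("a", 1), ("b", 2)], 2)

def Spec_complex_delete (a_dictionary : List (String × Int)) (value : Int) (out : List (String × Int)) : Prop := out = complex_delete_alt a_dictionary value
instance (a_dictionary : List (String × Int)) (value : Int) (out : List (String × Int)) : Decidable (Spec_complex_delete a_dictionary value out) := by unfold Spec_complex_delete; infer_instance

-- ===== CLAIM (what is proved, stated in full; the proofs are below) =====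
def Claim_equal_complex_delete : Prop := ∀ (a_dictionary : List (String × Int)) (value : Int), Dom_complex_delete a_dictionary value → Pre_complex_delete a_dictionary value → Spec_complex_delete a_dictionary value (complex_delete a_dictionary value)

-- ===== LEMMAS AND PROOFS =====

-- with distinct keys, looking up a member pair's key returns its value
theorem pvLookup_mem (d : List (String × Int)) (p : String × Int)
    (hnd : (d.map Prod.fst).Nodup) (hp : p ∈ d) : pvLookup d p.1 = some p.2 := by
  induction d with
  | nil => cases hp
  | cons q t ih =>
      simp only [List.map_cons, List.nodup_cons] at hnd
      rcases List.mem_cons.1 hp with h | h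
      · subst h; simp [pvLookup]
      · have hne : q.1 ≠ p.1 := by
          intro he
          exact hnd.1 (he ▸ List.mem_map_of_mem h)
        simp [pvLookup, hne, ih hnd.2 h]

-- the collect loop lists exactly the keys of the matching pairs
theorem pvCollect_eq (full : List (String × Int)) (value : Int) :
    ∀ d : List (String × Int), (∀ p ∈ d, pvLookup full p.1 = some value ↔ p.2 = value) →
    pvCollect full d value = (d.filter (fun p => p.2 == value)).map Prod.fst := by
  intro d
  induction d with
  | nil => intro _; simp [pvCollect]
  | cons q t ih =>
      intro h
      have hq := h q (List.mem_cons_self)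
      have ht := ih (fun p hp => h p (List.mem_cons_of_mem _ hp))
      by_cases hv : q.2 = value
      · simp [pvCollect, hq.2 hv, hv, ht]
      · have : ¬ pvLookup full q.1 = some value := fun hc => hv (hq.1 hc)
        simp [pvCollect, this, hv, ht]

-- deleting keys that all differ from the head's key skips the head
theorem foldl_pvDel_cons (p : String × Int) (t : List (String × Int)) :
    ∀ keys : List String, (∀ k ∈ keys, k ≠ p.1) →
    keys.foldl pvDel (p :: t) = p :: keys.foldl pvDel t := by
  intro keys
  induction keys generalizing t with
  | nil => intro _; rfl
  | cons k ks ih =>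
      intro h
      have hk : p.1 ≠ k := fun he => h k List.mem_cons_self he.symm
      simp only [List.foldl_cons, pvDel, if_neg hk]
      exact ih (pvDel t k) (fun x hx => h x (List.mem_cons_of_mem _ hx))

-- the delete loop over the matching keys leaves exactly the non-matching pairs
theorem foldl_pvDel_filter (value : Int) :
    ∀ d : List (String × Int), (d.map Prod.fst).Nodup →
    ((d.filter (fun p => p.2 == value)).map Prod.fst).foldl pvDel d
      = d.filter (fun p => p.2 != value) := by
  intro d
  induction d with
  | nil => intro _; rfl
  | cons q t ih =>
      intro hnd
      simp only [List.map_cons, List.nodup_cons] at hnd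
      have hkeys : ∀ k ∈ (t.filter (fun p => p.2 == value)).map Prod.fst, k ≠ q.1 := by
        intro k hk he
        rcases List.mem_map.1 hk with ⟨p, hp, hpk⟩
        exact hnd.1 (he ▸ hpk ▸ List.mem_map_of_mem (List.mem_of_mem_filter hp))
      by_cases hv : q.2 = value
      · have h1 : (q :: t).filter (fun p => p.2 == value)
            = q :: t.filter (fun p => p.2 == value) := by simp [hv]
        have h2 : (q :: t).filter (fun p => p.2 != value)
            = t.filter (fun p => p.2 != value) := by simp [hv]
        have h3 : pvDel (q :: t) q.1 = t := by simp [pvDel]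
        rw [h1, h2, List.map_cons, List.foldl_cons, h3, ih hnd.2]
      · have h1 : (q :: t).filter (fun p => p.2 == value)
            = t.filter (fun p => p.2 == value) := by simp [hv]
        have h2 : (q :: t).filter (fun p => p.2 != value)
            = q :: t.filter (fun p => p.2 != value) := by simp [hv]
        rw [h1, h2, foldl_pvDel_cons q t _ hkeys, ih hnd.2]

-- ===== VERDICT (by name: the statement is the Claim_ definition above) =====
theorem complex_delete_spec : Claim_equal_complex_delete := by
  intro d value _ hpre
  unfold Spec_complex_delete complex_delete complex_delete_alt
  have hcol : pvCollect d d value = (d.filter (fun p => p.2 == value)).map Prod.fst := by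
    apply pvCollect_eq
    intro p hp
    rw [pvLookup_mem d p hpre hp]
    simp
  rw [hcol]
  exact foldl_pvDel_filter value d hpre
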